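-- pv_equiv track=rewrite | github.com/Dawn-of-Time/Operations-Research-Calculator | Utils/utilsCalculate.py | findUnitMatrix
-- ===== SOURCE A (Python) =====
-- def findUnitMatrix(matrix:list) -> list:
--     # Construct the matrix as column vectors.
--     rowNum = len(matrix)
--     columnNum = len(matrix[0])
--     newMatrix = []
--     unitIndexList = []
--     # Change the matrix from a list of row vectors to a list of column vectors.
--     for columnIndex in range(columnNum):
--         column = []
--         for rowIndex in range(rowNum):
--             column.append(matrix[rowIndex][columnIndex])
--         newMatrix.append(column)
--     # Find the unit vectors in turn.
--     for rowIndex in range(rowNum):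
--         findFlag = False
--         tempColumn = [0] * rowNum
--         tempColumn[rowIndex] = 1
--         for index in range(len(newMatrix)):
--             if tempColumn == newMatrix[index]:
--                 unitIndexList.append(index) # Record the position of the unit vector.
--                 findFlag = True
--         if not findFlag:
--             unitIndexList.append(-1) # Can not find.
--     return unitIndexList
-- ===== SOURCE B (Python) =====
-- def _unitRow(col):
--     # Return r if col is the standard unit vector e_r, else None (single pass).
--     unitRow = None
--     for i, v in enumerate(col):
--         if v == 1 and unitRow is None:
--             unitRow = i
--         elif v != 0:
--             return None
--     return unitRow
--
-- def findUnitMatrix(matrix: list) -> list: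
--     rowNum = len(matrix)
--     columnNum = len(matrix[0])
--     buckets = [[] for _ in range(rowNum)]
--     for j in range(columnNum):
--         r = _unitRow([row[j] for row in matrix])
--         if r is not None:
--             buckets[r].append(j)
--     result = []
--     for b in buckets:
--         result.extend(b if b else [-1])
--     return result
-- ===== Notes on version B (the rewrite author's own statement) =====
-- stated objective: faster
-- what changed: Instead of building the full transpose and then comparing every length-rowNum unit vector against every column (rowNum*columnNum list comparisons of length rowNum), B classifies each column once in a single scan as 'the unit vector e_r or not', buckets column indices by r, and emits the buckets (or -1) in row order.
import Mathlib
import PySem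

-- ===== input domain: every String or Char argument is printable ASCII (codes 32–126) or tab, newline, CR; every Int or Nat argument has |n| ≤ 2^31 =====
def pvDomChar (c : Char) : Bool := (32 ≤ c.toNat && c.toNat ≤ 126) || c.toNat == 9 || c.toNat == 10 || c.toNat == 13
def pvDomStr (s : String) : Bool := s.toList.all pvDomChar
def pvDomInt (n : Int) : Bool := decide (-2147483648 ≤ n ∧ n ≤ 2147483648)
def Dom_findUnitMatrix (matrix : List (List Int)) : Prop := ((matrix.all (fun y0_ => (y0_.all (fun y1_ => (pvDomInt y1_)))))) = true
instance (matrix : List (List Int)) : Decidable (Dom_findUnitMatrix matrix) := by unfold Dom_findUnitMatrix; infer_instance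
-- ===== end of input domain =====

-- B classifies each column once (single scan) instead of comparing every unit vector
-- against every column: O(rowNum*columnNum) instead of O(rowNum^2*columnNum).

-- ===== PORT A =====
-- Loop indices produced by range(...) are nonnegative and, under Pre_, in range,
-- so `getD` indexing is exact there; len(matrix[0]) is `(matrix.headD []).length`
-- (exact under Pre_, which demands matrix ≠ []).
def findUnitMatrix (matrix : List (List Int)) : List Int :=
  let rowNum := matrix.length
  let columnNum := (matrix.headD []).length
  let newMatrix := (List.range columnNum).foldl (fun nm columnIndex =>
    nm ++ [(List.range rowNum).foldl (fun column rowIndex =>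
      column ++ [((matrix.getD rowIndex []).getD columnIndex 0)]) []]) []
  (List.range rowNum).foldl (fun unitIndexList rowIndex =>
    let tempColumn := (List.replicate rowNum (0 : Int)).set rowIndex 1
    let st := (List.range newMatrix.length).foldl
      (fun (st : List Int × Bool) index =>
        if tempColumn = newMatrix.getD index [] then (st.1 ++ [(index : Int)], true) else st)
      (unitIndexList, false)
    if !st.2 then st.1 ++ [-1] else st.1) []

-- ===== PORT B =====
-- `_unitRow(col)` of Source B: single scan with early return, carrying the position of
-- the (first) 1 seen so far.
def unitRowScan : List Int → Nat → Option Nat → Option Nat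
  | [], _, ur => ur
  | v :: rest, i, ur =>
    if v = 1 ∧ ur = none then unitRowScan rest (i + 1) (some i)
    else if v ≠ 0 then none
    else unitRowScan rest (i + 1) ur

def findUnitMatrix_alt (matrix : List (List Int)) : List Int :=
  let rowNum := matrix.length
  let columnNum := (matrix.headD []).length
  let buckets := (List.range columnNum).foldl (fun (bk : List (List Int)) (j : Nat) =>
    match unitRowScan (matrix.map (fun row => row.getD j 0)) 0 none with
    | some r => bk.set r (bk.getD r [] ++ [(j : Int)])
    | none => bk) (List.replicate rowNum [])
  buckets.foldl (fun result b => result ++ (if b = [] then [-1] else b)) []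

-- ===== PRECONDITION & SPEC =====
-- Pre_ excludes exactly the inputs on which the Python A raises IndexError:
-- the empty matrix (matrix[0]) and matrices with a row shorter than the first row
-- (matrix[rowIndex][columnIndex]).
def Pre_findUnitMatrix (matrix : List (List Int)) : Prop :=
  matrix ≠ [] ∧ ∀ row ∈ matrix, (matrix.headD []).length ≤ row.length
instance (matrix : List (List Int)) : Decidable (Pre_findUnitMatrix matrix) := by
  unfold Pre_findUnitMatrix; infer_instance
def pvWitness_findUnitMatrix : List (List Int) := [[1, 0, 2], [0, 1, 0]]
def Spec_findUnitMatrix (matrix : List (List Int)) (out : List Int) : Prop := out = findUnitMatrix_alt matrix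
instance (matrix : List (List Int)) (out : List Int) : Decidable (Spec_findUnitMatrix matrix out) := by unfold Spec_findUnitMatrix; infer_instance

-- ===== CLAIM (what is proved, stated in full; the proofs are below) =====
def Claim_equal_findUnitMatrix : Prop := ∀ (matrix : List (List Int)), Dom_findUnitMatrix matrix → Pre_findUnitMatrix matrix → Spec_findUnitMatrix matrix (findUnitMatrix matrix)

-- ===== LEMMAS AND PROOFS =====

-- the unit vector e_r of length n
def unitVec (r n : Nat) : List Int := (List.replicate n (0 : Int)).set r 1

-- column j of the matrix, as B extracts it
def colOf (matrix : List (List Int)) (j : Nat) : List Int :=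
  matrix.map (fun row => row.getD j 0)

theorem unitVec_zero (m : Nat) : unitVec 0 (m + 1) = 1 :: List.replicate m 0 := by
  simp [unitVec, List.replicate_succ]

theorem unitVec_succ (k m : Nat) : unitVec (k + 1) (m + 1) = 0 :: unitVec k m := by
  simp [unitVec, List.replicate_succ]

theorem unitRowScan_some_all_zero (vs : List Int) (i u : Nat) (h : ∀ v ∈ vs, v = 0) :
    unitRowScan vs i (some u) = some u := by
  induction vs generalizing i with
  | nil => rfl
  | cons v rest ih =>
    have hv : v = 0 := h v (by simp)
    subst hv
    show (if (0:Int) = 1 ∧ (some u : Option Nat) = none then _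
          else if (0:Int) ≠ 0 then none else unitRowScan rest (i + 1) (some u)) = some u
    rw [if_neg (by simp), if_neg (by simp)]
    exact ih (i + 1) (fun v hv => h v (by simp [hv]))

theorem unitRowScan_some_not_zero (vs : List Int) (i u : Nat) (h : ∃ v ∈ vs, v ≠ 0) :
    unitRowScan vs i (some u) = none := by
  induction vs generalizing i with
  | nil => simp at h
  | cons v rest ih =>
    show (if v = 1 ∧ (some u : Option Nat) = none then _
          else if v ≠ 0 then none else unitRowScan rest (i + 1) (some u)) = none
    rw [if_neg (by simp)]
    by_cases hv : v = 0
    · subst hv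
      rw [if_neg (by simp)]
      rcases h with ⟨w, hw, hwne⟩
      rcases List.mem_cons.mp hw with h' | h'
      · exact absurd h'.symm (Ne.symm hwne)
      · exact ih (i + 1) ⟨w, h', hwne⟩
    · rw [if_pos hv]

theorem unitRowScan_none_eq_some_iff (vs : List Int) (i r : Nat) :
    unitRowScan vs i none = some r ↔
      ∃ k, k < vs.length ∧ r = i + k ∧ vs = unitVec k vs.length := by
  induction vs generalizing i with
  | nil => simp [unitRowScan]
  | cons v rest ih =>
    show (if v = 1 ∧ (none : Option Nat) = none then unitRowScan rest (i + 1) (some i)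
          else if v ≠ 0 then none else unitRowScan rest (i + 1) none) = some r ↔ _
    by_cases h1 : v = 1
    · subst h1
      rw [if_pos (by simp)]
      by_cases hz : ∀ w ∈ rest, w = 0
      · rw [unitRowScan_some_all_zero rest (i + 1) i hz]
        have hrep : rest = List.replicate rest.length 0 := List.eq_replicate_of_mem hz
        constructor
        · rintro h; injection h with h; subst h
          exact ⟨0, by simp, by simp, by
            rw [List.length_cons, unitVec_zero]
            exact congrArg (1 :: ·) hrep⟩
        · rintro ⟨k, hk, hr, hvec⟩
          rcases k with _ | k
          · simp [hr]
          · rw [List.length_cons, unitVec_succ] at hvec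
            exact absurd (List.head_eq_of_cons_eq hvec) (by norm_num)
      · obtain ⟨w, hw, hwne⟩ : ∃ w ∈ rest, w ≠ 0 := by
          by_contra hc
          exact hz (fun w hw => by
            by_contra hne
            exact hc ⟨w, hw, hne⟩)
        rw [unitRowScan_some_not_zero rest (i + 1) i ⟨w, hw, hwne⟩]
        constructor
        · rintro ⟨⟩
        · rintro ⟨k, hk, hr, hvec⟩
          rcases k with _ | k
          · rw [List.length_cons, unitVec_zero] at hvec
            have hrest : rest = List.replicate rest.length 0 := List.tail_eq_of_cons_eq hvec
            exact (hwne (List.eq_of_mem_replicate (hrest ▸ hw))).elim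
          · rw [List.length_cons, unitVec_succ] at hvec
            exact absurd (List.head_eq_of_cons_eq hvec) (by norm_num)
    · rw [if_neg (by simp [h1])]
      by_cases hz : v = 0
      · subst hz
        rw [if_neg (by simp)]
        rw [ih (i + 1)]
        constructor
        · rintro ⟨k, hk, hr, hvec⟩
          exact ⟨k + 1, by simpa using Nat.succ_lt_succ hk, by omega, by
            rw [List.length_cons, unitVec_succ, ← hvec]⟩
        · rintro ⟨k, hk, hr, hvec⟩
          rcases k with _ | k
          · rw [List.length_cons, unitVec_zero] at hvec
            exact absurd (List.head_eq_of_cons_eq hvec) (by norm_num)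
          · rw [List.length_cons, unitVec_succ] at hvec
            exact ⟨k, by simpa using Nat.lt_of_succ_lt_succ (by simpa using hk),
              by omega, List.tail_eq_of_cons_eq hvec⟩
      · rw [if_pos hz]
        constructor
        · rintro ⟨⟩
        · rintro ⟨k, hk, hr, hvec⟩
          rcases k with _ | k
          · rw [List.length_cons, unitVec_zero] at hvec
            exact absurd (List.head_eq_of_cons_eq hvec) h1
          · rw [List.length_cons, unitVec_succ] at hvec
            exact absurd (List.head_eq_of_cons_eq hvec) hz

-- corollary: classification of a column ↔ equality with a unit vector
theorem unitRowScan_iff (vs : List Int) (r : Nat) (hr : r < vs.length) :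
    unitRowScan vs 0 none = some r ↔ vs = unitVec r vs.length := by
  rw [unitRowScan_none_eq_some_iff]
  constructor
  · rintro ⟨k, hk, rfl, hvec⟩; simpa using hvec
  · intro hvec; exact ⟨r, hr, by omega, hvec⟩

theorem unitRowScan_some_lt (vs : List Int) (r : Nat)
    (h : unitRowScan vs 0 none = some r) : r < vs.length := by
  rcases (unitRowScan_none_eq_some_iff vs 0 r).mp h with ⟨k, hk, hr, _⟩
  omega

-- A's inner search loop, characterised: appends all matching indices, flag = found any
theorem foldl_search (L : List Nat) (g : Nat → List Int) (t : List Int) (ul : List Int) (b : Bool) :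
    L.foldl (fun (st : List Int × Bool) index =>
        if t = g index then (st.1 ++ [(index : Int)], true) else st) (ul, b)
      = (ul ++ (L.filter (fun index => t = g index)).map (fun index => Int.ofNat index),
         b || !(L.filter (fun index => t = g index)).isEmpty) := by
  induction L generalizing ul b with
  | nil => simp
  | cons x xs ih =>
    rw [List.foldl_cons]
    by_cases hx : t = g x
    · rw [if_pos hx, ih, List.filter_cons_of_pos (by simpa using hx), List.map_cons]
      rw [Prod.mk.injEq]
      constructor
      · rw [List.append_assoc]; rfl
      · simp
    · rw [if_neg hx, ih, List.filter_cons_of_neg (by simpa using hx)]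

-- range/getD bridges
theorem map_range_getD {α β : Type} (l : List α) (d : α) (f : α → β) :
    (List.range l.length).map (fun i => f (l.getD i d)) = l.map f := by
  apply List.ext_getElem
  · simp
  · intro i h1 h2
    simp only [List.getElem_map, List.getElem_range]
    congr 1
    exact List.getD_eq_getElem l d (by simpa using h1)

theorem getD_map_range {β : Type} (n : Nat) (f : Nat → β) (d : β) (i : Nat) (h : i < n) :
    ((List.range n).map f).getD i d = f i := by
  rw [List.getD_eq_getElem _ _ (by simpa using h)]
  simp

theorem set_map_range {β : Type} (n : Nat) (f : Nat → β) (r : Nat) (x : β) (_hr : r < n) :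
    ((List.range n).map f).set r x
      = (List.range n).map (fun r' => if r' = r then x else f r') := by
  apply List.ext_getElem
  · simp
  · intro i h1 h2
    simp only [List.getElem_set, List.getElem_map, List.getElem_range]
    by_cases hi : r = i
    · simp [hi]
    · rw [if_neg hi, if_neg (fun h => hi h.symm)]

-- B's bucket loop, characterised
theorem buckets_eq (matrix : List (List Int)) (n : Nat) :
    (List.range n).foldl (fun (bk : List (List Int)) j =>
        match unitRowScan (colOf matrix j) 0 none with
        | some r => bk.set r (bk.getD r [] ++ [(j : Int)])
        | none => bk) (List.replicate matrix.length [])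
      = (List.range matrix.length).map (fun r =>
          ((List.range n).filter (fun j => unitRowScan (colOf matrix j) 0 none = some r)).map
            (fun j => Int.ofNat j)) := by
  induction n with
  | zero =>
    simp only [List.range_zero, List.foldl_nil, List.filter_nil, List.map_nil]
    apply List.ext_getElem
    · simp
    · intro i h1 h2
      simp
  | succ n ih =>
    rw [List.range_succ, List.foldl_append, ih, List.foldl_cons, List.foldl_nil]
    rcases hscan : unitRowScan (colOf matrix n) 0 none with _ | r
    · simp only []
      apply List.map_congr_left
      intro r _
      rw [List.filter_append]
      simp [hscan]
    · have hrlt : r < matrix.length := by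
        have := unitRowScan_some_lt (colOf matrix n) r hscan
        simpa [colOf] using this
      simp only []
      rw [getD_map_range _ _ _ _ hrlt, set_map_range _ _ _ _ hrlt]
      apply List.map_congr_left
      intro r' hr'
      rw [List.filter_append]
      by_cases hrr : r' = r
      · subst hrr; simp [hscan]
      · simp [hscan, Ne.symm hrr, hrr]

-- A's transposed matrix equals B's column extraction
theorem newMatrix_eq (matrix : List (List Int)) :
    (List.range (matrix.headD []).length).foldl (fun nm columnIndex =>
        nm ++ [(List.range matrix.length).foldl (fun column rowIndex =>
          column ++ [((matrix.getD rowIndex []).getD columnIndex 0)]) []])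
      []
      = (List.range (matrix.headD []).length).map (fun j => colOf matrix j) := by
  rw [PySem.List.foldl_append_singleton_eq_map]
  simp only [List.nil_append]
  apply List.map_congr_left
  intro j _
  rw [PySem.List.foldl_append_singleton_eq_map]
  simp only [List.nil_append]
  exact map_range_getD matrix [] (fun row => row.getD j 0)

-- length of a column
theorem colOf_def (matrix : List (List Int)) (j : Nat) :
    matrix.map (fun row => row.getD j 0) = colOf matrix j := rfl

theorem colOf_length (matrix : List (List Int)) (j : Nat) :
    (colOf matrix j).length = matrix.length := by simp [colOf]

-- ===== VERDICT (by name: the statement is the Claim_ definition above) =====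
theorem findUnitMatrix_spec : Claim_equal_findUnitMatrix := by
  intro matrix _ _
  unfold Spec_findUnitMatrix findUnitMatrix findUnitMatrix_alt
  simp only []
  rw [newMatrix_eq]
  simp only [colOf_def]
  rw [buckets_eq, List.foldl_map]
  set rowNum := matrix.length with hrow
  set columnNum := (matrix.headD []).length with hcol
  -- both sides are folds over List.range rowNum appending one block per row
  have hA : ∀ (ul : List Int) (r : Nat), r < rowNum →
      (let tempColumn := (List.replicate rowNum (0 : Int)).set r 1
       let st := (List.range ((List.range columnNum).map (fun j => colOf matrix j)).length).foldl
         (fun (st : List Int × Bool) index =>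
           if tempColumn = ((List.range columnNum).map (fun j => colOf matrix j)).getD index []
           then (st.1 ++ [(index : Int)], true) else st) (ul, false)
       if !st.2 then st.1 ++ [-1] else st.1)
      = ul ++ (let hits := ((List.range columnNum).filter
                 (fun j => unitRowScan (colOf matrix j) 0 none = some r)).map
                 (fun j => Int.ofNat j);
               if hits = [] then [-1] else hits) := by
    intro ul r hr
    simp only [List.length_map, List.length_range]
    rw [foldl_search]
    have hfilter : (List.range columnNum).filter
        (fun index => (List.replicate rowNum (0 : Int)).set r 1
          = ((List.range columnNum).map (fun j => colOf matrix j)).getD index [])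
        = (List.range columnNum).filter
            (fun j => unitRowScan (colOf matrix j) 0 none = some r) := by
      apply List.filter_congr
      intro j hj
      have hjlt : j < columnNum := by simpa using hj
      rw [getD_map_range _ _ _ _ hjlt]
      have hiff := unitRowScan_iff (colOf matrix j) r (by rw [colOf_length]; exact hr)
      rw [colOf_length] at hiff
      simp only [decide_eq_decide]
      rw [hiff]
      constructor
      · intro h; exact h.symm
      · intro h; exact h.symm
    rw [hfilter]
    by_cases he : (List.range columnNum).filter
        (fun j => unitRowScan (colOf matrix j) 0 none = some r) = []
    · simp [he]
    · simp [he, List.isEmpty_iff]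
  -- rewrite A's fold step by step
  have congrFold : ∀ (L : List Nat) (init : List Int), (∀ r ∈ L, r < rowNum) →
      L.foldl (fun unitIndexList rowIndex =>
        let tempColumn := (List.replicate rowNum (0 : Int)).set rowIndex 1
        let st := (List.range ((List.range columnNum).map (fun j => colOf matrix j)).length).foldl
          (fun (st : List Int × Bool) index =>
            if tempColumn = ((List.range columnNum).map (fun j => colOf matrix j)).getD index []
            then (st.1 ++ [(index : Int)], true) else st) (unitIndexList, false)
        if !st.2 then st.1 ++ [-1] else st.1) init
      = L.foldl (fun result r =>
          result ++ (let hits := ((List.range columnNum).filter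
              (fun j => unitRowScan (colOf matrix j) 0 none = some r)).map (fun j => Int.ofNat j);
            if hits = [] then [-1] else hits)) init := by
    intro L
    induction L with
    | nil => intro init _; rfl
    | cons x xs ih =>
      intro init hmem
      simp only [List.foldl_cons]
      rw [hA init x (hmem x (by simp))]
      exact ih _ (fun r hr => hmem r (by simp [hr]))
  rw [congrFold (List.range rowNum) [] (fun r hr => by simpa using hr)]
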